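-- pv_equiv track=rewrite | github.com/MJL85/natlas | natlas/node.py | __parse_allowed_vlans
-- ===== SOURCE A (Python) =====
-- def __parse_allowed_vlans(allowed_vlans):
--     if (allowed_vlans.startswith('0x') == False):
--         return 'All'
--
--     ret = ''
--     group = 0
--     op = 0
--
--     for i in range(2, len(allowed_vlans)):
--         v = int(allowed_vlans[i], 16)
--         for b in range(0, 4):
--             a = v & (0x1 << (3 - b))
--             vlan = ((i-2)*4)+b
--
--             if (a):
--                 if (op == 1):
--                     group += 1
--                 else:
--                     if (len(ret)):
--                         if (group > 1):
--                             ret += '-'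
--                             ret += str(vlan - 1) if vlan else '1'
--                         else:
--                             ret += ',%i' % vlan
--                     else:
--                         ret += str(vlan)
--                     group = 0
--                     op = 1
--             else:
--                 if (op == 1):
--                     if (len(ret)):
--                         if (group > 1):
--                             ret += '-%i' % (vlan - 1)
--                     op = 0
--                 group = 0
--
--     if (op):
--         if (ret == '1'):
--             return 'All'
--         if (group):
--             ret += '-1001'
--         else:
--             ret += ',1001'
--
--     return ret if len(ret) else 'All'
-- ===== SOURCE B (Python) =====
-- def __parse_allowed_vlans(allowed_vlans):
--     if not allowed_vlans.startswith('0x'):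
--         return 'All'
--     # Phase 1: collect set-bit positions (vlan numbers), MSB-first per hex digit
--     bits = []
--     for i in range(2, len(allowed_vlans)):
--         v = int(allowed_vlans[i], 16)
--         for b in range(4):
--             if (v >> (3 - b)) & 1:
--                 bits.append((i - 2) * 4 + b)
--     # Phase 2: compress the increasing position list into maximal runs
--     runs = []
--     for x in bits:
--         if runs and runs[-1][1] == x - 1:
--             runs[-1][1] = x
--         else:
--             runs.append([x, x])
--     last_bit = 4 * (len(allowed_vlans) - 2) - 1
--     trailing = bool(runs) and runs[-1][1] == last_bit
--     if trailing and len(runs) == 1 and runs[0][0] == 1: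
--         return 'All'
--     # Phase 3: format the runs
--     pieces = []
--     for idx, (s, e) in enumerate(runs):
--         seg = str(s)
--         if trailing and idx == len(runs) - 1:
--             seg += ('-1001' if e > s else ',1001')
--         elif e - s >= 2:
--             seg += '-' + str(e)
--         pieces.append(seg)
--     return ','.join(pieces) if pieces else 'All'
-- ===== Notes on version B (the rewrite author's own statement) =====
-- stated objective: alternative
-- what changed: A's single stateful scan (ret/group/op string accumulator updated bit by bit) is replaced by a three-phase pipeline: collect the set-bit positions, compress them into maximal consecutive runs, then format the runs in one pass.
import Mathlib
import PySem

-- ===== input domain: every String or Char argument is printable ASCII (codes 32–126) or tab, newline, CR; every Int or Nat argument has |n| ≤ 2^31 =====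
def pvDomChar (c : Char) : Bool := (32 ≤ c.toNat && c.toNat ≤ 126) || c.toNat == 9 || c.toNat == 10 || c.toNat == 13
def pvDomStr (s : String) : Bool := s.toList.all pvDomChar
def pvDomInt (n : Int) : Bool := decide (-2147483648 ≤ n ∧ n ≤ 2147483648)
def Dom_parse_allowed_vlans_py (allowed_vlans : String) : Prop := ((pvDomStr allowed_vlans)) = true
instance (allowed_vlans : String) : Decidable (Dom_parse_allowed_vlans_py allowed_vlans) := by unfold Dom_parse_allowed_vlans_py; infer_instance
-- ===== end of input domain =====

-- B re-implements the hex-bitmap → VLAN-range formatter in three phases (collect set bits,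
-- compress to runs, format the runs) instead of A's single stateful scan; same cost, alternative structure.

-- ===== PORT A =====
-- int(c, 16) for the single hex digit c; Pre_ excludes non-hex digits (Python raises ValueError there)
def pvHexVal (c : Char) : Nat :=
  if c.isDigit then c.toNat - 48
  else if 'a' ≤ c ∧ c ≤ 'f' then c.toNat - 87
  else if 'A' ≤ c ∧ c ≤ 'F' then c.toNat - 55
  else 0

-- one iteration of A's inner loop body, state (ret, group, op)
def pvStepA : List Char × Int × Int → Int → Bool → List Char × Int × Int
  | (ret, group, op), vlan, a =>
    if a then
      if op = 1 then (ret, group + 1, op)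
      else
        ((if ret ≠ [] then
            (if group > 1 then ret ++ '-' :: (if vlan ≠ 0 then PySem.Int.toChars (vlan - 1) else ['1'])
             else ret ++ ',' :: PySem.Int.toChars vlan)
          else ret ++ PySem.Int.toChars vlan), 0, 1)
    else
      if op = 1 then
        ((if ret ≠ [] ∧ group > 1 then ret ++ '-' :: PySem.Int.toChars (vlan - 1) else ret), 0, 0)
      else (ret, 0, op)

def parse_allowed_vlans_py (allowed_vlans : String) : String :=
  if !(PySem.Str.startswith allowed_vlans "0x") then "All"
  else
    let st := (PySem.List.enumerate (allowed_vlans.toList.drop 2) 2).foldl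
      (fun st ic =>
        (List.range 4).foldl
          (fun st (b : Nat) => pvStepA st ((ic.1 - 2) * 4 + (b : Int)) (pvHexVal ic.2 &&& ((1 : Nat) <<< (3 - b)) != 0))
          st)
      ([], 0, 0)
    if st.2.2 ≠ 0 then
      if st.1 = ['1'] then "All"
      else if st.2.1 ≠ 0 then String.ofList (st.1 ++ ['-', '1', '0', '0', '1'])
      else String.ofList (st.1 ++ [',', '1', '0', '0', '1'])
    else if st.1 ≠ [] then String.ofList st.1 else "All"

-- ===== PORT B =====
-- one step of B's run compression: extend the last run or start a new one (runs[-1][1] = x / append)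
def pvRunsStep (runs : List (Int × Int)) (x : Int) : List (Int × Int) :=
  match runs.getLast? with
  | some r => if r.2 = x - 1 then runs.dropLast ++ [(r.1, x)] else runs ++ [(x, x)]
  | none => [(x, x)]

def parse_allowed_vlans_py_alt (allowed_vlans : String) : String :=
  if !(PySem.Str.startswith allowed_vlans "0x") then "All"
  else
    let bits := (PySem.List.enumerate (allowed_vlans.toList.drop 2) 2).foldl
      (fun acc ic =>
        (List.range 4).foldl
          (fun acc (b : Nat) => if pvHexVal ic.2 &&& ((1 : Nat) <<< (3 - b)) != 0 then acc ++ [(ic.1 - 2) * 4 + (b : Int)] else acc)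
          acc) []
    let runs := bits.foldl pvRunsStep []
    let lastBit : Int := 4 * ((allowed_vlans.toList.length : Int) - 2) - 1
    let trailing : Bool := match runs.getLast? with
      | some r => r.2 == lastBit
      | none => false
    if trailing && (runs.length == 1) && (PySem.Int.toChars (runs.headD (0, 0)).1 == ['1']) then "All"
    else
      let pieces := (PySem.List.enumerate runs 0).foldl (fun acc p =>
        acc ++ [(PySem.Int.toChars p.2.1 ++
          (if trailing && (p.1 == (runs.length : Int) - 1) then
            (if p.2.2 > p.2.1 then ['-', '1', '0', '0', '1'] else [',', '1', '0', '0', '1'])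
          else if p.2.2 - p.2.1 ≥ 2 then '-' :: PySem.Int.toChars p.2.2
          else []))]) []
      if pieces = [] then "All" else String.ofList (PySem.Chars.join [','] pieces)

-- ===== PRECONDITION & SPEC =====
-- Pre_ excludes exactly the inputs where Python raises ValueError: a '0x'-prefixed string with a
-- non-hex-digit character after the prefix (both A and B call int(c, 16) on every such character).
def Pre_parse_allowed_vlans_py (allowed_vlans : String) : Prop :=
  PySem.Str.startswith allowed_vlans "0x" = true →
    ((allowed_vlans.toList.drop 2).all (fun c =>
      (48 ≤ c.toNat && c.toNat ≤ 57) || (97 ≤ c.toNat && c.toNat ≤ 102) || (65 ≤ c.toNat && c.toNat ≤ 70))) = true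
instance (allowed_vlans : String) : Decidable (Pre_parse_allowed_vlans_py allowed_vlans) := by unfold Pre_parse_allowed_vlans_py; infer_instance

def pvWitness_parse_allowed_vlans_py : String := "0x1f"

def Spec_parse_allowed_vlans_py (allowed_vlans : String) (out : String) : Prop := out = parse_allowed_vlans_py_alt allowed_vlans
instance (allowed_vlans : String) (out : String) : Decidable (Spec_parse_allowed_vlans_py allowed_vlans out) := by unfold Spec_parse_allowed_vlans_py; infer_instance

-- ===== CLAIM (what is proved, stated in full; the proofs are below) =====
def Claim_equal_parse_allowed_vlans_py : Prop := ∀ (allowed_vlans : String), Dom_parse_allowed_vlans_py allowed_vlans → Pre_parse_allowed_vlans_py allowed_vlans → Spec_parse_allowed_vlans_py allowed_vlans (parse_allowed_vlans_py allowed_vlans)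

-- ===== LEMMAS AND PROOFS =====

-- the bit of hex digit c selected by A's inner loop variable b
def pvBitAt (c : Char) (b : Nat) : Bool := pvHexVal c &&& ((1 : Nat) <<< (3 - b)) != 0


def pvBitsChar (c : Char) : List Bool := [pvBitAt c 0, pvBitAt c 1, pvBitAt c 2, pvBitAt c 3]

def pvStream (cs : List Char) : List Bool := cs.flatMap pvBitsChar

def pvAfold (bs : List Bool) : List Char × Int × Int :=
  (PySem.List.enumerate bs 0).foldl (fun st p => pvStepA st p.1 p.2) ([], 0, 0)

def pvBitsOf (bs : List Bool) : List Int :=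
  (PySem.List.enumerate bs 0).foldl (fun acc p => if p.2 then acc ++ [p.1] else acc) []

def pvRuns (bs : List Bool) : List (Int × Int) := (pvBitsOf bs).foldl pvRunsStep []

def pvPiece (r : Int × Int) : List Char :=
  PySem.Int.toChars r.1 ++ (if r.2 - r.1 ≥ 2 then '-' :: PySem.Int.toChars r.2 else [])

def pvRenderClosed (R : List (Int × Int)) : List Char := PySem.Chars.join [','] (R.map pvPiece)

def pvInv (bs : List Bool) : Prop :=
  (pvAfold bs).2.2 = (if bs.getLast? = some true then 1 else 0) ∧
  ((pvRuns bs).getLast? = none → (pvAfold bs).1 = [] ∧ (pvAfold bs).2.1 = 0 ∧ bs.getLast? ≠ some true) ∧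
  (∀ r, (pvRuns bs).getLast? = some r → 0 ≤ r.1 ∧ r.1 ≤ r.2 ∧ r.2 ≤ (bs.length : Int) - 1 ∧
      (r.2 = (bs.length : Int) - 1 ↔ bs.getLast? = some true) ∧
      (pvAfold bs).2.1 = (if bs.getLast? = some true then r.2 - r.1 else 0) ∧
      (pvAfold bs).1 = (if bs.getLast? = some true then
          pvRenderClosed (pvRuns bs).dropLast ++ (if (pvRuns bs).dropLast = [] then [] else [',']) ++ PySem.Int.toChars r.1
        else pvRenderClosed (pvRuns bs)))

lemma pvToChars_ne_nil (x : Int) : PySem.Int.toChars x ≠ [] := by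
  unfold PySem.Int.toChars
  split
  · simp
  · have h := @Nat.length_toDigits_pos 10 x.toNat
    intro hc
    rw [hc] at h
    simp at h

lemma pvPiece_ne_nil (r : Int × Int) : pvPiece r ≠ [] := by
  unfold pvPiece
  intro h
  exact pvToChars_ne_nil r.1 (List.append_eq_nil_iff.mp h).1

lemma pvJoin_append_singleton (ps : List (List Char)) (p : List Char) :
    PySem.Chars.join [','] (ps ++ [p]) =
      if ps = [] then p else PySem.Chars.join [','] ps ++ ',' :: p := by
  induction ps with
  | nil => simp [PySem.Chars.join_singleton]
  | cons a t ih =>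
    cases t with
    | nil => simp [PySem.Chars.join_cons_cons, PySem.Chars.join_singleton]
    | cons b t' =>
      simp only [List.cons_append] at ih
      simp only [List.cons_append, PySem.Chars.join_cons_cons, ih]
      simp

lemma pvRenderClosed_ne_nil (R : List (Int × Int)) (h : R ≠ []) : pvRenderClosed R ≠ [] := by
  cases R with
  | nil => exact absurd rfl h
  | cons r t =>
    cases t with
    | nil => simpa [pvRenderClosed, PySem.Chars.join_singleton] using pvPiece_ne_nil r
    | cons b t' =>
      simp only [pvRenderClosed, List.map_cons, PySem.Chars.join_cons_cons]
      intro hc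
      exact pvPiece_ne_nil r (List.append_eq_nil_iff.mp (List.append_eq_nil_iff.mp hc).1).1

lemma pvRenderClosed_append_singleton (R : List (Int × Int)) (r : Int × Int) :
    pvRenderClosed (R ++ [r]) = pvRenderClosed R ++ (if R = [] then [] else [',']) ++ pvPiece r := by
  unfold pvRenderClosed
  rw [List.map_append, List.map_singleton, pvJoin_append_singleton]
  cases R <;> simp [PySem.Chars.join_nil]

lemma pvAfold_append (bs : List Bool) (x : Bool) :
    pvAfold (bs ++ [x]) = pvStepA (pvAfold bs) (bs.length : Int) x := by
  unfold pvAfold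
  rw [PySem.List.enumerate_append, List.foldl_append]
  simp [PySem.List.enumerate_cons, PySem.List.enumerate_nil]

lemma pvBitsOf_append (bs : List Bool) (x : Bool) :
    pvBitsOf (bs ++ [x]) = if x then pvBitsOf bs ++ [(bs.length : Int)] else pvBitsOf bs := by
  unfold pvBitsOf
  rw [PySem.List.enumerate_append, List.foldl_append]
  cases x <;> simp [PySem.List.enumerate_cons, PySem.List.enumerate_nil]

lemma pvRuns_append (bs : List Bool) (x : Bool) :
    pvRuns (bs ++ [x]) = if x then pvRunsStep (pvRuns bs) (bs.length : Int) else pvRuns bs := by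
  unfold pvRuns
  rw [pvBitsOf_append]
  cases x <;> simp [List.foldl_append]

lemma pvInv_holds (bs : List Bool) : pvInv bs := by
  induction bs using List.reverseRecOn with
  | nil =>
    refine ⟨by simp [pvAfold, PySem.List.enumerate_nil], ?_, ?_⟩
    · intro _; simp [pvAfold, PySem.List.enumerate_nil]
    · intro r hr; simp [pvRuns, pvBitsOf, PySem.List.enumerate_nil] at hr
  | append_singleton bs x ih =>
    obtain ⟨hop, hnone, hsome⟩ := ih
    rcases hst : pvAfold bs with ⟨ret, group, op⟩
    rw [hst] at hop hnone hsome
    simp only at hop hnone hsome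
    have hAF : pvAfold (bs ++ [x]) = pvStepA (ret, group, op) (bs.length : Int) x := by
      rw [pvAfold_append, hst]
    have hRN := pvRuns_append bs x
    rcases hR : (pvRuns bs).getLast? with _ | r
    · -- no run yet: R = []
      have hRnil : pvRuns bs = [] := List.getLast?_eq_none_iff.mp hR
      obtain ⟨hret, hgroup, hnop⟩ := hnone hR
      have hopv : op = 0 := by rw [hop, if_neg hnop]
      subst hret hgroup hopv
      cases x with
      | false =>
        refine ⟨?_, ?_, ?_⟩
        · rw [hAF]; simp [pvStepA]
        · intro _; rw [hAF]; simp [pvStepA]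
        · intro r hr
          rw [hRN, if_neg (by simp), hRnil] at hr
          simp at hr
      | true =>
        have hruns : pvRuns (bs ++ [true]) = [((bs.length : Int), (bs.length : Int))] := by
          rw [hRN, if_pos rfl, hRnil]; rfl
        refine ⟨?_, ?_, ?_⟩
        · rw [hAF]; simp [pvStepA]
        · intro h; rw [hruns] at h; simp at h
        · intro r hr
          rw [hruns] at hr
          simp at hr
          subst hr
          rw [hAF]
          refine ⟨by positivity, le_refl _, by simp <;> omega, by simp, ?_, ?_⟩
          · simp [pvStepA]
          · simp [pvStepA, hruns, pvRenderClosed]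
    · -- there is a last run r
      obtain ⟨h1, h2, h3, h4, h5, h6⟩ := hsome r hR
      obtain ⟨R₀, hR0⟩ := List.getLast?_eq_some_iff.mp hR
      by_cases hlast : bs.getLast? = some true
      · -- open run: op = 1
        have hopv : op = 1 := by rw [hop, if_pos hlast]
        have hgroup : group = r.2 - r.1 := by rw [h5, if_pos hlast]
        have hr2 : r.2 = (bs.length : Int) - 1 := h4.mpr hlast
        have hret : ret = pvRenderClosed (pvRuns bs).dropLast ++
            (if (pvRuns bs).dropLast = [] then [] else [',']) ++ PySem.Int.toChars r.1 := by
          rw [h6, if_pos hlast]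
        have hdrop : (pvRuns bs).dropLast = R₀ := by rw [hR0]; simp
        cases x with
        | true =>
          have hruns : pvRuns (bs ++ [true]) = R₀ ++ [(r.1, (bs.length : Int))] := by
            rw [hRN, if_pos rfl, hR0, pvRunsStep]
            simp [hr2]
          refine ⟨?_, ?_, ?_⟩
          · rw [hAF]; simp [pvStepA, hopv]
          · intro h; rw [hruns] at h; simp at h
          · intro r' hr'
            rw [hruns, List.getLast?_concat] at hr'
            injection hr' with hr'
            subst hr'
            rw [hAF]
            simp only [pvStepA, hopv]
            refine ⟨h1, by omega, by simp <;> omega, by simp, by simp <;> omega, ?_⟩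
            simp only [List.getLast?_concat, List.length_append]
            norm_num
            rw [hruns]
            simp only [List.dropLast_concat]
            rw [hret, hdrop]
            simp
        | false =>
          have hruns : pvRuns (bs ++ [false]) = pvRuns bs := by
            rw [hRN, if_neg (by simp)]
          have hretne : ret ≠ [] := by
            rw [hret]; intro hc
            exact pvToChars_ne_nil r.1 (List.append_eq_nil_iff.mp hc).2
          refine ⟨?_, ?_, ?_⟩
          · rw [hAF]; simp [pvStepA, hopv]
          · intro h; rw [hruns, hR] at h; simp at h
          · intro r' hr'
            rw [hruns, hR] at hr'
            injection hr' with hr'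
            subst hr'
            have hlast' : ¬ ((bs ++ [false]).getLast? = some true) := by simp
            refine ⟨h1, h2, by simp <;> omega, by simp <;> omega, ?_, ?_⟩
            · rw [hAF]; simp [pvStepA, hopv]
            · have hstep : pvStepA (ret, group, op) (bs.length : Int) false =
                  ((if ret ≠ [] ∧ group > 1 then ret ++ '-' :: PySem.Int.toChars ((bs.length : Int) - 1) else ret), 0, 0) := by
                simp [pvStepA, hopv]
              rw [hAF, hstep]
              simp only
              rw [if_neg hlast', hruns, hR0, pvRenderClosed_append_singleton]
              by_cases hg : group > 1
              · rw [if_pos ⟨hretne, hg⟩]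
                have h2' : r.2 - r.1 ≥ 2 := by omega
                rw [pvPiece, if_pos h2']
                have he : (bs.length : Int) - 1 = r.2 := by omega
                rw [he, hret, hdrop]
                simp
              · rw [if_neg (by tauto)]
                have h2' : ¬ (r.2 - r.1 ≥ 2) := by omega
                rw [pvPiece, if_neg h2', hret, hdrop]
                simp
      · -- closed state: op = 0
        have hopv : op = 0 := by rw [hop, if_neg hlast]
        have hgroup : group = 0 := by rw [h5, if_neg hlast]
        have hr2 : r.2 ≠ (bs.length : Int) - 1 := fun hc => hlast (h4.mp hc)
        have hret : ret = pvRenderClosed (pvRuns bs) := by rw [h6, if_neg hlast]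
        have hRne : pvRuns bs ≠ [] := by rw [hR0]; simp
        cases x with
        | true =>
          have hruns : pvRuns (bs ++ [true]) = pvRuns bs ++ [((bs.length : Int), (bs.length : Int))] := by
            rw [hRN, if_pos rfl, pvRunsStep, hR]
            simp [hr2]
          have hretne : ret ≠ [] := by rw [hret]; exact pvRenderClosed_ne_nil _ hRne
          refine ⟨?_, ?_, ?_⟩
          · rw [hAF]; simp [pvStepA, hopv]
          · intro h; rw [hruns] at h; simp at h
          · intro r' hr'
            rw [hruns, List.getLast?_concat] at hr'
            injection hr' with hr'
            subst hr'
            rw [hAF]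
            simp only [pvStepA, hopv, if_neg (by norm_num : ¬ ((0:Int) = 1))]
            have hd : (pvRuns (bs ++ [true])).dropLast = pvRuns bs := by
              rw [hruns]; simp
            refine ⟨by positivity, le_refl _, by simp <;> omega, by simp, by simp, ?_⟩
            simp only [List.getLast?_concat]
            rw [hd, if_neg hRne, if_pos hretne, if_neg (by omega : ¬ (group > 1)), hret]
            simp
        | false =>
          have hruns : pvRuns (bs ++ [false]) = pvRuns bs := by
            rw [hRN, if_neg (by simp)]
          refine ⟨?_, ?_, ?_⟩
          · rw [hAF]; simp [pvStepA, hopv]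
          · intro h; rw [hruns, hR] at h; simp at h
          · intro r' hr'
            rw [hruns, hR] at hr'
            injection hr' with hr'
            subst hr'
            refine ⟨h1, h2, by simp <;> omega, by simp <;> omega, ?_, ?_⟩
            · rw [hAF]; simp [pvStepA, hopv]
            · rw [hAF]
              simp only [pvStepA, hopv, if_neg (by simp : ¬ (false = true)), if_neg (by norm_num : ¬ ((0:Int) = 1))]
              rw [if_neg (by simp : ¬ ((bs ++ [false]).getLast? = some true)), hruns, hret]

lemma pvA_flatten (cs : List Char) (k : Int) (st : List Char × Int × Int) :
    (PySem.List.enumerate cs (k + 2)).foldl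
      (fun st ic =>
        (List.range 4).foldl
          (fun st (b : Nat) => pvStepA st ((ic.1 - 2) * 4 + (b : Int)) (pvHexVal ic.2 &&& ((1 : Nat) <<< (3 - b)) != 0))
          st) st
  = (PySem.List.enumerate (pvStream cs) (4 * k)).foldl (fun st p => pvStepA st p.1 p.2) st := by
  induction cs generalizing k st with
  | nil => simp [pvStream, PySem.List.enumerate_nil]
  | cons c t ih =>
    rw [PySem.List.enumerate_cons, List.foldl_cons]
    rw [show k + 2 + 1 = (k + 1) + 2 by ring]
    rw [ih]
    rw [show pvStream (c :: t) = pvBitsChar c ++ pvStream t from rfl]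
    rw [PySem.List.enumerate_append]
    rw [List.foldl_append]
    simp only [pvBitsChar, pvBitAt, List.foldl_cons, List.foldl_nil, List.length_cons,
      List.length_nil, PySem.List.enumerate_cons, PySem.List.enumerate_nil]
    rw [show (List.range 4) = [0, 1, 2, 3] from rfl]
    simp only [List.foldl_cons, List.foldl_nil]
    congr 1
    · push_cast
      ring_nf
    · congr 1 <;> push_cast <;> ring_nf

lemma pvB_flatten (cs : List Char) (k : Int) (acc : List Int) :
    (PySem.List.enumerate cs (k + 2)).foldl
      (fun acc ic =>
        (List.range 4).foldl
          (fun acc (b : Nat) => if pvHexVal ic.2 &&& ((1 : Nat) <<< (3 - b)) != 0 then acc ++ [(ic.1 - 2) * 4 + (b : Int)] else acc)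
          acc) acc
  = (PySem.List.enumerate (pvStream cs) (4 * k)).foldl (fun acc p => if p.2 then acc ++ [p.1] else acc) acc := by
  induction cs generalizing k acc with
  | nil => simp [pvStream, PySem.List.enumerate_nil]
  | cons c t ih =>
    rw [PySem.List.enumerate_cons, List.foldl_cons]
    rw [show k + 2 + 1 = (k + 1) + 2 by ring]
    rw [ih]
    rw [show pvStream (c :: t) = pvBitsChar c ++ pvStream t from rfl]
    rw [PySem.List.enumerate_append]
    rw [List.foldl_append]
    simp only [pvBitsChar, pvBitAt, List.foldl_cons, List.foldl_nil, List.length_cons,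
      List.length_nil, PySem.List.enumerate_cons, PySem.List.enumerate_nil]
    rw [show (List.range 4) = [0, 1, 2, 3] from rfl]
    simp only [List.foldl_cons, List.foldl_nil]
    congr 1
    · push_cast
      ring_nf
    · congr 1 <;> push_cast <;> ring_nf

lemma pvStream_length (cs : List Char) : (pvStream cs).length = 4 * cs.length := by
  induction cs with
  | nil => simp [pvStream]
  | cons c t ih => simp [pvStream, pvBitsChar] at ih ⊢; omega

lemma pvMapPieceEnum (R : List (Int × Int)) (s0 : Int) :
    (PySem.List.enumerate R s0).map (fun p => pvPiece p.2) = R.map pvPiece := by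
  conv_rhs => rw [← PySem.List.map_snd_enumerate R s0]
  rw [List.map_map]
  rfl

-- ===== VERDICT (by name: the statement is the Claim_ definition above) =====
theorem parse_allowed_vlans_py_spec : Claim_equal_parse_allowed_vlans_py := by
  intro s _hDom _hPre
  unfold Spec_parse_allowed_vlans_py parse_allowed_vlans_py parse_allowed_vlans_py_alt
  by_cases hsw : PySem.Str.startswith s "0x" = true
  · rw [hsw]
    simp only [Bool.not_true, Bool.false_eq_true, if_false]
    have hA := pvA_flatten (s.toList.drop 2) 0 ([], 0, 0)
    have hB := pvB_flatten (s.toList.drop 2) 0 []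
    rw [show (0 : Int) + 2 = 2 by norm_num, show (4 : Int) * 0 = 0 by norm_num] at hA hB
    rw [hA, hB]
    rw [show (PySem.List.enumerate (pvStream (s.toList.drop 2)) 0).foldl (fun st p => pvStepA st p.1 p.2) (([], 0, 0) : List Char × Int × Int) = pvAfold (pvStream (s.toList.drop 2)) from rfl]
    rw [show (PySem.List.enumerate (pvStream (s.toList.drop 2)) 0).foldl (fun acc p => if p.2 then acc ++ [p.1] else acc) ([] : List Int) = pvBitsOf (pvStream (s.toList.drop 2)) from rfl]
    rw [show (pvBitsOf (pvStream (s.toList.drop 2))).foldl pvRunsStep [] = pvRuns (pvStream (s.toList.drop 2)) from rfl]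
    have hlen2 : 2 ≤ s.toList.length := by
      have hp := (PySem.Chars.startswith_iff s.toList "0x".toList).mp
        (by rw [← PySem.Str.startswith_eq]; exact hsw)
      simpa using hp.length_le
    have hLB : 4 * ((s.toList.length : Int) - 2) - 1 = ((pvStream (s.toList.drop 2)).length : Int) - 1 := by
      rw [pvStream_length]
      push_cast [List.length_drop]
      omega
    rw [hLB]
    generalize pvStream (s.toList.drop 2) = bs
    obtain ⟨hop, hnone, hsome⟩ := pvInv_holds bs
    rcases hst : pvAfold bs with ⟨ret, group, op⟩
    rw [hst] at hop hnone hsome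
    simp only at hop hnone hsome
    rcases hR : (pvRuns bs).getLast? with _ | r
    · -- no runs at all
      have hRnil : pvRuns bs = [] := List.getLast?_eq_none_iff.mp hR
      obtain ⟨hret, hgroup, hnop⟩ := hnone hR
      have hopv : op = 0 := by rw [hop, if_neg hnop]
      subst hret hgroup hopv
      rw [hRnil]
      simp [PySem.List.enumerate_nil]
    · obtain ⟨h1, h2, h3, h4, h5, h6⟩ := hsome r hR
      obtain ⟨R₀, hR0⟩ := List.getLast?_eq_some_iff.mp hR
      have hdrop : (pvRuns bs).dropLast = R₀ := by rw [hR0]; simp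
      by_cases hlast : bs.getLast? = some true
      · -- final run is open: A appends -1001 / ,1001; B's trailing is true
        have hopv : op = 1 := by rw [hop, if_pos hlast]
        have hgroupv : group = r.2 - r.1 := by rw [h5, if_pos hlast]
        have hr2 : r.2 = (bs.length : Int) - 1 := h4.mpr hlast
        have hret : ret = pvRenderClosed R₀ ++ (if R₀ = [] then [] else [',']) ++ PySem.Int.toChars r.1 := by
          rw [h6, if_pos hlast, hdrop]
        rw [hR0]
        simp only [List.getLast?_concat, show (r.2 == (bs.length : Int) - 1) = true by simp [hr2]]
        rcases eq_or_ne R₀ [] with hR0nil | hR0ne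
        · subst hR0nil
          simp only [List.nil_append] at hret ⊢
          rw [show ret = PySem.Int.toChars r.1 by simpa using hret]
          simp only [List.length_cons, List.length_nil, PySem.List.enumerate_cons,
            PySem.List.enumerate_nil, List.headD]
          by_cases hone : PySem.Int.toChars r.1 = ['1']
          · rw [if_pos (by simp [hopv]), if_pos hone]
            simp [hone]
          · rw [if_pos (by simp [hopv]), if_neg hone]
            by_cases hgt : r.1 < r.2
            · rw [if_pos (by omega : group ≠ 0)]
              simp [hone, hgt, PySem.Chars.join_singleton]
            · rw [if_neg (by omega : ¬ group ≠ 0)]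
              simp [hone, (by omega : ¬ (r.2 > r.1)), PySem.Chars.join_singleton]
        · -- at least two runs: guard is false on both sides
          have hmapne : R₀.map pvPiece ≠ [] := by simpa using hR0ne
          have hretne1 : ret ≠ ['1'] := by
            rw [hret, if_neg hR0ne]
            intro hc
            have hl := congrArg List.length hc
            simp at hl
            have := List.length_pos_iff.mpr (pvRenderClosed_ne_nil R₀ hR0ne)
            have := List.length_pos_iff.mpr (pvToChars_ne_nil r.1)
            omega
          rw [if_pos (by simp [hopv]), if_neg hretne1]
          rw [show (((R₀ ++ [r]).length == 1) = false) by simp [hR0ne]]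
          simp only [Bool.and_false, Bool.false_and, Bool.false_eq_true, if_false]
          rw [PySem.List.foldl_append_singleton_eq_map, List.nil_append]
          rw [PySem.List.enumerate_append, List.map_append]
          have hhead : (PySem.List.enumerate R₀ 0).map (fun p =>
              PySem.Int.toChars p.2.1 ++
                (if (true && (p.1 == ((R₀ ++ [r]).length : Int) - 1)) = true then
                  (if p.2.2 > p.2.1 then ['-', '1', '0', '0', '1'] else [',', '1', '0', '0', '1'])
                else if p.2.2 - p.2.1 ≥ 2 then '-' :: PySem.Int.toChars p.2.2
                else [])) = R₀.map pvPiece := by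
            rw [← pvMapPieceEnum R₀ 0]
            apply List.map_congr_left
            intro p hp
            obtain ⟨k, hk, hpk⟩ := (PySem.List.mem_enumerate_iff R₀ 0 p).mp hp
            subst hpk
            rw [show ((((0 : Int) + (k : Int)) == ((R₀ ++ [r]).length : Int) - 1) = false) by
              simp only [beq_eq_false_iff_ne, ne_eq, List.length_append, List.length_cons, List.length_nil]
              push_cast
              omega]
            simp [pvPiece]
          rw [hhead]
          simp only [PySem.List.enumerate_cons, PySem.List.enumerate_nil, List.map_cons, List.map_nil]
          rw [show (((0 : Int) + (R₀.length : Int)) == ((R₀ ++ [r]).length : Int) - 1) = true by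
            simp only [beq_iff_eq, List.length_append, List.length_cons, List.length_nil]
            push_cast
            omega]
          simp only [Bool.true_and, eq_self_iff_true, if_true]
          rw [pvJoin_append_singleton, if_neg hmapne]
          rw [if_neg (by simp : ¬ (R₀.map pvPiece ++ [PySem.Int.toChars r.1 ++
            (if r.2 > r.1 then ['-', '1', '0', '0', '1'] else [',', '1', '0', '0', '1'])] = []))]
          rw [hret, if_neg hR0ne]
          by_cases hgt : r.1 < r.2
          · rw [if_pos (by omega : group ≠ 0), if_pos hgt]
            simp [pvRenderClosed]
          · rw [if_neg (by omega : ¬ group ≠ 0), if_neg hgt]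
            simp [pvRenderClosed]
      · -- final run is closed: no trailing handling on either side
        have hopv : op = 0 := by rw [hop, if_neg hlast]
        have hr2 : r.2 ≠ (bs.length : Int) - 1 := fun hc => hlast (h4.mp hc)
        have hret : ret = pvRenderClosed (pvRuns bs) := by rw [h6, if_neg hlast]
        have hRne : pvRuns bs ≠ [] := by rw [hR0]; simp
        have hretne : ret ≠ [] := by rw [hret]; exact pvRenderClosed_ne_nil _ hRne
        rw [hR0]
        simp only [List.getLast?_concat, show (r.2 == (bs.length : Int) - 1) = false by simp [hr2]]
        simp only [Bool.false_and, Bool.false_eq_true, if_false]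
        rw [if_neg (by simp [hopv] : ¬ (op ≠ 0)), if_pos hretne]
        rw [PySem.List.foldl_append_singleton_eq_map, List.nil_append]
        have hall : (PySem.List.enumerate (R₀ ++ [r]) 0).map (fun p =>
            PySem.Int.toChars p.2.1 ++
              (if p.2.2 - p.2.1 ≥ 2 then '-' :: PySem.Int.toChars p.2.2 else []))
            = (R₀ ++ [r]).map pvPiece := by
          rw [← pvMapPieceEnum (R₀ ++ [r]) 0]
          rfl
        rw [hall]
        rw [if_neg (by simp : ¬ ((R₀ ++ [r]).map pvPiece = []))]
        rw [hret, hR0]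
        rfl
  · simp only [PySem.Str.startswith_eq, Bool.not_eq_true] at hsw
    rw [show "0x".toList = ['0', 'x'] from rfl] at hsw
    simp [hsw]
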